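-- pv_equiv track=rewrite | github.com/ravisrhyme/CTCI | IC/single_rifle_check.py | is_single_riffle_recursive
-- ===== SOURCE A (Python) =====
-- def is_single_riffle_recursive(shuffled_deck, half1,half2):
-- 	""" Checks if it is a single riffle.
-- 	Time Complexity = O(n^2) i.e n stack calls + O(n) operation for each slicing
-- 	Space Complexity = O(n^2) i.e O(n) space per call to copy slice and O(N) calls
-- 	"""
-- 	if len(shuffled_deck) == 0:
-- 		return True
--
-- 	if len(half1) != 0 and shuffled_deck[0] == half1[0]:
-- 		return is_single_riffle_recursive(shuffled_deck[1:], half1[1:],half2)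
--
-- 	elif len(half2) != 0 and shuffled_deck[0] == half2[0]:
-- 		return is_single_riffle_recursive(shuffled_deck[1:], half1,half2[1:])
--
-- 	return False
-- ===== SOURCE B (Python) =====
-- def is_single_riffle_recursive(shuffled_deck, half1, half2):
--     """Iterative two-pointer greedy check: O(n) time, O(1) extra space."""
--     i = j = 0
--     for card in shuffled_deck:
--         if i < len(half1) and card == half1[i]:
--             i += 1
--         elif j < len(half2) and card == half2[j]:
--             j += 1
--         else:
--             return False
--     return True
-- ===== Notes on version B (the rewrite author's own statement) =====
-- stated objective: faster
-- what changed: Replaced the recursion that copies list slices at every step with a single iterative pass keeping two index pointers into the halves.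
import Mathlib
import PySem

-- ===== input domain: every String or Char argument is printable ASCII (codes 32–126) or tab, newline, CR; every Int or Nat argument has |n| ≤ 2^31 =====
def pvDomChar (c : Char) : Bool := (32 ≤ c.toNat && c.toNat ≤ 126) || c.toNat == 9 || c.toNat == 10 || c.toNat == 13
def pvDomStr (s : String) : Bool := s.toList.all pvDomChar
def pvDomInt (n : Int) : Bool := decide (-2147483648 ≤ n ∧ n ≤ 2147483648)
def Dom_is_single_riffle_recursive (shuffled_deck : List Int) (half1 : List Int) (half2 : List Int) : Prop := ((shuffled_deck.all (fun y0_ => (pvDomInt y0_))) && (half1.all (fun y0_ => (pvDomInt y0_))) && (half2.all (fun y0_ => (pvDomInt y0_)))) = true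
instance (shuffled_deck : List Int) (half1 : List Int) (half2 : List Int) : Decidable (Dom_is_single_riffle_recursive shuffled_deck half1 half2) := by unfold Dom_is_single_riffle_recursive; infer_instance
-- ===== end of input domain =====

-- B replaces A's slicing recursion with one iterative pass over the deck keeping two
-- index pointers into the halves (O(n) instead of O(n^2); measured faster on large inputs).

-- ===== PORT A =====
-- Literal port of A: recursion on shuffled_deck; shuffled_deck[1:] is the tail of the
-- nonempty deck, half[1:] is PySem.List.slice (exact Python slice semantics).
def is_single_riffle_recursive (shuffled_deck : List Int) (half1 : List Int) (half2 : List Int) : Bool :=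
  match shuffled_deck with
  | [] => true        -- len(shuffled_deck) == 0
  | d :: rest =>
    if half1.length ≠ 0 && (some d == PySem.List.pyGet? half1 0) then
      is_single_riffle_recursive rest (PySem.List.slice half1 (some 1) none) half2
    else if half2.length ≠ 0 && (some d == PySem.List.pyGet? half2 0) then
      is_single_riffle_recursive rest half1 (PySem.List.slice half2 (some 1) none)
    else false

-- ===== PORT B =====
-- B's loop: walk the deck once, carrying the two pointers i and j.
def riffleLoop (half1 : List Int) (half2 : List Int) : List Int → Nat → Nat → Bool
  | [], _, _ => true
  | card :: cs, i, j =>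
    if i < half1.length && (half1[i]? == some card) then
      riffleLoop half1 half2 cs (i + 1) j
    else if j < half2.length && (half2[j]? == some card) then
      riffleLoop half1 half2 cs i (j + 1)
    else false

def is_single_riffle_recursive_alt (shuffled_deck : List Int) (half1 : List Int) (half2 : List Int) : Bool :=
  riffleLoop half1 half2 shuffled_deck 0 0

-- ===== PRECONDITION & SPEC =====
def Spec_is_single_riffle_recursive (shuffled_deck : List Int) (half1 : List Int) (half2 : List Int) (out : Bool) : Prop := out = is_single_riffle_recursive_alt shuffled_deck half1 half2
instance (shuffled_deck : List Int) (half1 : List Int) (half2 : List Int) (out : Bool) : Decidable (Spec_is_single_riffle_recursive shuffled_deck half1 half2 out) := by unfold Spec_is_single_riffle_recursive; infer_instance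

-- ===== CLAIM (what is proved, stated in full; the proofs are below) =====
def Claim_equal_is_single_riffle_recursive : Prop := ∀ (shuffled_deck : List Int) (half1 : List Int) (half2 : List Int), Dom_is_single_riffle_recursive shuffled_deck half1 half2 → Spec_is_single_riffle_recursive shuffled_deck half1 half2 (is_single_riffle_recursive shuffled_deck half1 half2)

-- ===== LEMMAS AND PROOFS =====

-- Invariant: A called on the suffixes (drop i, drop j) of the halves computes
-- exactly B's loop carrying the pointers i, j.
theorem riffle_drop (s : List Int) : ∀ (h1 h2 : List Int) (i j : Nat),
    is_single_riffle_recursive s (h1.drop i) (h2.drop j) = riffleLoop h1 h2 s i j := by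
  induction s with
  | nil => intro h1 h2 i j; rfl
  | cons d rest ih =>
    intro h1 h2 i j
    have e1 : ((h1.drop i).length ≠ 0 && (some d == PySem.List.pyGet? (h1.drop i) 0))
        = (i < h1.length && (h1[i]? == some d)) := by
      rcases h : h1[i]? with _ | x
      · have hle : h1.length ≤ i := List.getElem?_eq_none_iff.mp h
        simp [PySem.List.pyGet?, PySem.List.pyIdx?,
          Nat.sub_eq_zero_of_le hle, Nat.not_lt.mpr hle]
      · have hi : i < h1.length := by
          by_contra hc
          simp [List.getElem?_eq_none_iff.mpr (Nat.le_of_not_lt hc)] at h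
        have hx : h1[i] = x := by simpa [List.getElem?_eq_getElem hi] using h
        simp [PySem.List.pyGet?, PySem.List.pyIdx?, List.getElem?_drop, hx, hi,
          Nat.sub_eq_zero_iff_le, Nat.not_le.mpr hi, eq_comm]
    have e2 : ((h2.drop j).length ≠ 0 && (some d == PySem.List.pyGet? (h2.drop j) 0))
        = (j < h2.length && (h2[j]? == some d)) := by
      rcases h : h2[j]? with _ | x
      · have hle : h2.length ≤ j := List.getElem?_eq_none_iff.mp h
        simp [PySem.List.pyGet?, PySem.List.pyIdx?,
          Nat.sub_eq_zero_of_le hle, Nat.not_lt.mpr hle]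
      · have hj : j < h2.length := by
          by_contra hc
          simp [List.getElem?_eq_none_iff.mpr (Nat.le_of_not_lt hc)] at h
        have hx : h2[j] = x := by simpa [List.getElem?_eq_getElem hj] using h
        simp [PySem.List.pyGet?, PySem.List.pyIdx?, List.getElem?_drop, hx, hj,
          Nat.sub_eq_zero_iff_le, Nat.not_le.mpr hj, eq_comm]
    have d1 : PySem.List.slice (h1.drop i) (some 1) none = h1.drop (i + 1) := by
      rw [PySem.List.slice_from_one]; simp [List.tail_drop]
    have d2 : PySem.List.slice (h2.drop j) (some 1) none = h2.drop (j + 1) := by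
      rw [PySem.List.slice_from_one]; simp [List.tail_drop]
    rw [is_single_riffle_recursive.eq_def, riffleLoop]
    dsimp only
    rw [e1, e2, d1, d2]
    split
    · exact ih h1 h2 (i + 1) j
    · split
      · exact ih h1 h2 i (j + 1)
      · rfl

-- ===== VERDICT (by name: the statement is the Claim_ definition above) =====
theorem is_single_riffle_recursive_spec : Claim_equal_is_single_riffle_recursive := by
  intro s h1 h2 _
  show is_single_riffle_recursive s h1 h2 = is_single_riffle_recursive_alt s h1 h2
  have := riffle_drop s h1 h2 0 0
  simpa [is_single_riffle_recursive_alt] using this
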